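-- pv_equiv track=rewrite | github.com/nkinney06/fSTRs | figure_5.py | generate_motifs_by_complementarity
-- ===== SOURCE A (Python) =====
-- from itertools import product
--
-- def is_self_reverse_complement(motif):
--     """Check if an RNA motif is its own reverse complement."""
--     complement = {'A': 'U', 'U': 'A', 'G': 'C', 'C': 'G'}
--     rev_comp = "".join(complement[base] for base in reversed(motif))
--     return motif == rev_comp
--
-- def generate_motifs_by_complementarity(max_length):
--     """Generate all RNA motifs and separate them into self-reverse-complementary and non-complementary."""
--     bases = ['A', 'U', 'G', 'C']
--     self_complementary = set()
--     non_complementary = set()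
--
--     for length in range(1, max_length + 1):
--         for motif in product(bases, repeat=length):
--             motif_str = "".join(motif)
--             if is_self_reverse_complement(motif_str):
--                 self_complementary.add(motif_str)
--             else:
--                 non_complementary.add(motif_str)
--
--     return sorted(self_complementary), sorted(non_complementary)
-- ===== SOURCE B (Python) =====
-- from itertools import product
--
-- def generate_motifs_by_complementarity(max_length):
--     """Construct the self-reverse-complementary motifs directly by mirroring a free
--     half (even lengths only; no RNA base is self-complementary), and obtain the
--     non-complementary motifs as the set difference from all motifs."""
--     comp = {'A': 'U', 'U': 'A', 'G': 'C', 'C': 'G'}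
--     bases = ['A', 'U', 'G', 'C']
--     all_motifs = []
--     palindromes = []
--     for length in range(1, max_length + 1):
--         all_motifs += ["".join(p) for p in product(bases, repeat=length)]
--         if length % 2 == 0:
--             for half in product(bases, repeat=length // 2):
--                 h = "".join(half)
--                 palindromes.append(h + "".join(comp[b] for b in reversed(h)))
--     pal_set = set(palindromes)
--     non_set = set(all_motifs) - pal_set
--     return sorted(pal_set), sorted(non_set)
-- ===== Notes on version B (the rewrite author's own statement) =====
-- stated objective: alternative
-- what changed: B constructs the self-reverse-complementary motifs directly by mirroring every free half (even lengths only, since no RNA base is its own complement) instead of testing each enumerated motif, and obtains the non-complementary motifs as a set difference from the full motif list.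
import Mathlib
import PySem

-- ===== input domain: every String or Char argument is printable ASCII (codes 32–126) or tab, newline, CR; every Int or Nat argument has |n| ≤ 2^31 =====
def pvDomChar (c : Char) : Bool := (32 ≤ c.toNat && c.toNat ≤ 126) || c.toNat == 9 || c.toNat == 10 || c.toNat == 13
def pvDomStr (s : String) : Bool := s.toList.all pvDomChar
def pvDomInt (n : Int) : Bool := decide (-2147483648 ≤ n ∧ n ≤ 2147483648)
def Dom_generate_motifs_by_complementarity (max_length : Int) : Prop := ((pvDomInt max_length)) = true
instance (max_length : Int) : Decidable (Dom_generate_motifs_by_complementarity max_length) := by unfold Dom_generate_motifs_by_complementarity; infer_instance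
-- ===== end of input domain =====

-- B replaces A's per-motif reverse-complement test by direct mirror construction of the
-- self-complementary motifs (even lengths only) plus a set difference; alternative decomposition.

-- ===== PORT A =====

-- the complement dict {'A':'U','U':'A','G':'C','C':'G'}; exact on the four RNA bases,
-- which are the only characters either program ever looks up
def pvComp (c : Char) : Char :=
  if c = 'A' then 'U' else if c = 'U' then 'A'
  else if c = 'G' then 'C' else if c = 'C' then 'G' else c

def pvBases : List Char := ['A', 'U', 'G', 'C']

-- itertools.product(bases, repeat=n), in itertools order (leftmost position varies slowest)
def pvProd : Nat → List (List Char)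
  | 0 => [[]]
  | n + 1 => pvBases.flatMap (fun b => (pvProd n).map (b :: ·))

def is_self_reverse_complement (motif : String) : Bool :=
  motif == String.ofList (motif.toList.reverse.map pvComp)

def generate_motifs_by_complementarity (max_length : Int) : List String × List String :=
  let p :=
    (PySem.List.pyRange 1 (max_length + 1) 1).foldl
      (fun (st : PySem.Set String × PySem.Set String) length =>
        (pvProd length.toNat).foldl
          (fun st motif =>
            let motif_str := String.ofList motif
            if is_self_reverse_complement motif_str then
              (PySem.Set.add st.1 motif_str, st.2)
            else
              (st.1, PySem.Set.add st.2 motif_str)) st)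
      (PySem.Set.empty, PySem.Set.empty)
  (PySem.List.sorted p.1 (fun x => x) false, PySem.List.sorted p.2 (fun x => x) false)

-- ===== PORT B =====

-- h + ''.join(comp[b] for b in reversed(h))
def pvMirror (h : List Char) : List Char := h ++ h.reverse.map pvComp

def generate_motifs_by_complementarity_alt (max_length : Int) : List String × List String :=
  let p :=
    (PySem.List.pyRange 1 (max_length + 1) 1).foldl
      (fun (st : List String × List String) length =>
        let all := st.1 ++ (pvProd length.toNat).map String.ofList
        let pal :=
          if PySem.Int.mod length 2 == 0 then
            st.2 ++ (pvProd (PySem.Int.floordiv length 2).toNat).map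
                      (fun h => String.ofList (pvMirror h))
          else st.2
        (all, pal))
      ([], [])
  let palSet := PySem.Set.ofList p.2
  let nonSet := PySem.Set.diff (PySem.Set.ofList p.1) palSet
  (PySem.List.sorted palSet (fun x => x) false, PySem.List.sorted nonSet (fun x => x) false)

-- ===== PRECONDITION & SPEC =====
def Spec_generate_motifs_by_complementarity (max_length : Int) (out : List String × List String) : Prop := out = generate_motifs_by_complementarity_alt max_length
instance (max_length : Int) (out : List String × List String) : Decidable (Spec_generate_motifs_by_complementarity max_length out) := by unfold Spec_generate_motifs_by_complementarity; infer_instance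

-- ===== CLAIM (what is proved, stated in full; the proofs are below) =====
def Claim_equal_generate_motifs_by_complementarity : Prop := ∀ (max_length : Int), Dom_generate_motifs_by_complementarity max_length → Spec_generate_motifs_by_complementarity max_length (generate_motifs_by_complementarity max_length)

-- ===== LEMMAS AND PROOFS =====

-- membership in pvProd n: exactly the base strings of length n
theorem mem_pvProd (n : Nat) (m : List Char) :
    m ∈ pvProd n ↔ m.length = n ∧ ∀ c ∈ m, c ∈ pvBases := by
  induction n generalizing m with
  | zero =>
    constructor
    · rintro h; simp [pvProd] at h; simp [h]
    · rintro ⟨hl, _⟩; simp [pvProd, List.length_eq_zero_iff.1 hl]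
  | succ k ih =>
    simp only [pvProd, List.mem_flatMap, List.mem_map]
    constructor
    · rintro ⟨b, hb, t, ht, rfl⟩
      obtain ⟨hl, hall⟩ := (ih t).1 ht
      refine ⟨by simp [hl], ?_⟩
      intro c hc
      rcases List.mem_cons.1 hc with rfl | hc
      · exact hb
      · exact hall c hc
    · rintro ⟨hl, hall⟩
      cases m with
      | nil => simp at hl
      | cons b t =>
        refine ⟨b, hall b (by simp), t, (ih t).2 ⟨by simpa using hl, fun c hc => hall c (by simp [hc])⟩, rfl⟩

theorem pvComp_mem (c : Char) (h : c ∈ pvBases) : pvComp c ∈ pvBases := by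
  simp only [pvBases, List.mem_cons, List.not_mem_nil, or_false] at h ⊢
  rcases h with rfl | rfl | rfl | rfl <;> simp [pvComp]

theorem pvComp_comp (c : Char) (h : c ∈ pvBases) : pvComp (pvComp c) = c := by
  simp only [pvBases, List.mem_cons, List.not_mem_nil, or_false] at h
  rcases h with rfl | rfl | rfl | rfl <;> simp [pvComp]

theorem pvComp_ne (c : Char) (h : c ∈ pvBases) : pvComp c ≠ c := by
  simp only [pvBases, List.mem_cons, List.not_mem_nil, or_false] at h
  rcases h with rfl | rfl | rfl | rfl <;> simp [pvComp]

theorem ofList_inj (a b : List Char) : String.ofList a = String.ofList b ↔ a = b := by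
  constructor
  · intro h; have := congrArg String.toList h; simpa using this
  · intro h; rw [h]

-- A's test, phrased on the character list
theorem isrc_eq (m : List Char) :
    is_self_reverse_complement (String.ofList m) = decide (m = (m.map pvComp).reverse) := by
  simp only [is_self_reverse_complement, String.toList_ofList, List.map_reverse]
  rw [Bool.eq_iff_iff]
  simp [ofList_inj]

-- the self-reverse-complementary base strings of length n are exactly the mirrored halves
theorem isrc_iff_mirror (n : Nat) (m : List Char) (hm : m ∈ pvProd n) :
    is_self_reverse_complement (String.ofList m) = true ↔
      n % 2 = 0 ∧ ∃ h ∈ pvProd (n / 2), m = pvMirror h := by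
  obtain ⟨hl, hall⟩ := (mem_pvProd n m).1 hm
  rw [isrc_eq, decide_eq_true_iff]
  constructor
  · intro heq
    rcases Nat.even_or_odd n with he | ho
    · obtain ⟨k, hk⟩ := he
      have hkn : n / 2 = k := by omega
      have htk : (m.take k).length = k := by simp [hl]; omega
      have hdk : (m.drop k).length = k := by simp [hl]; omega
      have heq2 : m.take k ++ m.drop k
          = ((m.drop k).map pvComp).reverse ++ ((m.take k).map pvComp).reverse := by
        calc m.take k ++ m.drop k = m := List.take_append_drop k m
          _ = (m.map pvComp).reverse := heq
          _ = ((m.take k ++ m.drop k).map pvComp).reverse := by rw [List.take_append_drop]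
          _ = _ := by simp
      have hlen : (m.take k).length = (((m.drop k)).map pvComp).reverse.length := by
        simp [htk, hl]; omega
      obtain ⟨h1, h2⟩ := List.append_inj heq2 hlen
      refine ⟨by omega, m.take k, ?_, ?_⟩
      · rw [hkn]
        exact (mem_pvProd k _).2 ⟨htk, fun c hc => hall c (List.mem_of_mem_take hc)⟩
      · conv_lhs => rw [← List.take_append_drop k m]
        unfold pvMirror
        rw [h2, List.map_reverse]
    · exfalso
      obtain ⟨k, hk⟩ := ho
      have hkl : k < m.length := by omega
      have hq := congrArg (fun l => l[k]?) heq
      simp only at hq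
      rw [List.getElem?_reverse (by simp [hl]; omega)] at hq
      simp only [List.length_map, hl] at hq
      have hidx : n - 1 - k = k := by omega
      rw [hidx, List.getElem?_map, List.getElem?_eq_getElem hkl] at hq
      simp only [Option.map_some, Option.some.injEq] at hq
      exact pvComp_ne _ (hall _ (List.getElem_mem hkl)) hq.symm
  · rintro ⟨hev, h, hh, rfl⟩
    obtain ⟨hhl, hhall⟩ := (mem_pvProd _ h).1 hh
    unfold pvMirror
    have hcc : (h.reverse.map pvComp).map pvComp = h.reverse := by
      rw [List.map_map]
      have : ∀ c ∈ h.reverse, (pvComp ∘ pvComp) c = id c := by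
        intro c hc
        simpa using pvComp_comp c (hhall c (List.mem_reverse.1 hc))
      rw [List.map_congr_left this, List.map_id]
    have e1 : ((h.reverse.map pvComp).map pvComp).reverse = h := by
      rw [hcc, List.reverse_reverse]
    have e2 : (h.map pvComp).reverse = h.reverse.map pvComp := List.map_reverse.symm
    rw [List.map_append, List.reverse_append, e1, e2]

-- the non-pal direction: every palRaw element passes A's test
theorem isrc_mirror (k : Nat) (h : List Char) (hh : h ∈ pvProd k) :
    pvMirror h ∈ pvProd (2 * k) ∧ is_self_reverse_complement (String.ofList (pvMirror h)) = true := by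
  obtain ⟨hhl, hhall⟩ := (mem_pvProd _ h).1 hh
  have hmem : pvMirror h ∈ pvProd (2 * k) := by
    refine (mem_pvProd _ _).2 ⟨by simp [pvMirror, hhl]; omega, ?_⟩
    intro c hc
    rcases List.mem_append.1 hc with hc | hc
    · exact hhall c hc
    · obtain ⟨d, hd, rfl⟩ := List.mem_map.1 hc
      exact pvComp_mem d (hhall d (List.mem_reverse.1 hd))
  refine ⟨hmem, ?_⟩
  exact (isrc_iff_mirror (2 * k) _ hmem).2 ⟨by omega, h, by simpa [Nat.mul_div_cancel_left] using hh, rfl⟩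

-- ----- loop shapes -----

def pvSelfRaw (r : List Int) : List String :=
  r.flatMap (fun L => ((pvProd L.toNat).filter (fun m => is_self_reverse_complement (String.ofList m))).map String.ofList)

def pvNonRaw (r : List Int) : List String :=
  r.flatMap (fun L => ((pvProd L.toNat).filter (fun m => !is_self_reverse_complement (String.ofList m))).map String.ofList)

def pvAllRaw (r : List Int) : List String :=
  r.flatMap (fun L => (pvProd L.toNat).map String.ofList)

def pvPalRaw (r : List Int) : List String :=
  r.flatMap (fun L =>
    if PySem.Int.mod L 2 == 0 then
      (pvProd (PySem.Int.floordiv L 2).toNat).map (fun h => String.ofList (pvMirror h))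
    else [])

theorem update_append {α : Type} [BEq α] (s : PySem.Set α) (xs ys : List α) :
    PySem.Set.update s (xs ++ ys) = PySem.Set.update (PySem.Set.update s xs) ys := by
  simp [PySem.Set.update, List.foldl_append]

theorem innerA (l : List (List Char)) (st : PySem.Set String × PySem.Set String) :
    l.foldl
      (fun st motif =>
        let motif_str := String.ofList motif
        if is_self_reverse_complement motif_str then
          (PySem.Set.add st.1 motif_str, st.2)
        else
          (st.1, PySem.Set.add st.2 motif_str)) st
    = (PySem.Set.update st.1
        ((l.filter (fun m => is_self_reverse_complement (String.ofList m))).map String.ofList),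
       PySem.Set.update st.2
        ((l.filter (fun m => !is_self_reverse_complement (String.ofList m))).map String.ofList)) := by
  induction l generalizing st with
  | nil => simp [PySem.Set.update]
  | cons m l ih =>
    simp only [List.foldl_cons, List.filter_cons]
    by_cases hc : is_self_reverse_complement (String.ofList m) = true
    · rw [ih]; simp [hc, PySem.Set.update]
    · rw [ih]; simp [hc, PySem.Set.update]

theorem foldA_eq (r : List Int) (st : PySem.Set String × PySem.Set String) :
    r.foldl
      (fun (st : PySem.Set String × PySem.Set String) length =>
        (pvProd length.toNat).foldl
          (fun st motif =>
            let motif_str := String.ofList motif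
            if is_self_reverse_complement motif_str then
              (PySem.Set.add st.1 motif_str, st.2)
            else
              (st.1, PySem.Set.add st.2 motif_str)) st) st
    = (PySem.Set.update st.1 (pvSelfRaw r), PySem.Set.update st.2 (pvNonRaw r)) := by
  induction r generalizing st with
  | nil => simp [pvSelfRaw, pvNonRaw, PySem.Set.update]
  | cons L r ih =>
    rw [List.foldl_cons, innerA, ih]
    simp [pvSelfRaw, pvNonRaw, update_append]

theorem foldB_eq (r : List Int) (st : List String × List String) :
    r.foldl
      (fun (st : List String × List String) length =>
        (st.1 ++ (pvProd length.toNat).map String.ofList,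
         if PySem.Int.mod length 2 == 0 then
            st.2 ++ (pvProd (PySem.Int.floordiv length 2).toNat).map
                      (fun h => String.ofList (pvMirror h))
          else st.2)) st
    = (st.1 ++ pvAllRaw r, st.2 ++ pvPalRaw r) := by
  induction r generalizing st with
  | nil => simp [pvAllRaw, pvPalRaw]
  | cons L r ih =>
    rw [List.foldl_cons, ih]
    simp only [pvAllRaw, pvPalRaw, List.flatMap_cons, ← List.append_assoc]
    by_cases hc : (PySem.Int.mod L 2 == 0) = true
    · rw [if_pos hc, if_pos hc]
    · rw [if_neg hc, if_neg hc, List.append_nil]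

-- ----- membership of the raw lists -----

theorem mem_pvSelfRaw (r : List Int) (x : String) :
    x ∈ pvSelfRaw r ↔ ∃ L ∈ r, ∃ m ∈ pvProd L.toNat,
      is_self_reverse_complement (String.ofList m) = true ∧ x = String.ofList m := by
  simp [pvSelfRaw, List.mem_flatMap, List.mem_map, List.mem_filter]
  tauto

theorem mem_pvNonRaw (r : List Int) (x : String) :
    x ∈ pvNonRaw r ↔ ∃ L ∈ r, ∃ m ∈ pvProd L.toNat,
      is_self_reverse_complement (String.ofList m) = false ∧ x = String.ofList m := by
  simp [pvNonRaw, List.mem_flatMap, List.mem_map, List.mem_filter]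
  tauto

theorem mem_pvAllRaw (r : List Int) (x : String) :
    x ∈ pvAllRaw r ↔ ∃ L ∈ r, ∃ m ∈ pvProd L.toNat, x = String.ofList m := by
  simp [pvAllRaw, List.mem_flatMap, List.mem_map]
  tauto

theorem mem_pvPalRaw (r : List Int) (x : String) :
    x ∈ pvPalRaw r ↔ ∃ L ∈ r, PySem.Int.mod L 2 = 0 ∧
      ∃ h ∈ pvProd (PySem.Int.floordiv L 2).toNat, x = String.ofList (pvMirror h) := by
  simp only [pvPalRaw, List.mem_flatMap]
  constructor
  · rintro ⟨L, hL, hx⟩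
    by_cases hc : (PySem.Int.mod L 2 == 0) = true
    · rw [if_pos hc] at hx
      obtain ⟨h, hh, rfl⟩ := List.mem_map.1 hx
      exact ⟨L, hL, beq_iff_eq.1 hc, h, hh, rfl⟩
    · rw [if_neg hc] at hx
      simp at hx
  · rintro ⟨L, hL, hm0, h, hh, rfl⟩
    refine ⟨L, hL, ?_⟩
    rw [if_pos (beq_iff_eq.mpr hm0)]
    exact List.mem_map_of_mem hh

-- ----- the set-level equalities -----

theorem self_iff_pal (r : List Int) (hr : ∀ L ∈ r, 1 ≤ L) (x : String) :
    x ∈ pvSelfRaw r ↔ x ∈ pvPalRaw r := by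
  rw [mem_pvSelfRaw, mem_pvPalRaw]
  constructor
  · rintro ⟨L, hL, m, hm, hrc, rfl⟩
    have h1 : 1 ≤ L := hr L hL
    obtain ⟨hev, h, hh, hmh⟩ := (isrc_iff_mirror L.toNat m hm).1 hrc
    have hfd : (PySem.Int.floordiv L 2).toNat = L.toNat / 2 := by
      rw [PySem.Int.floordiv, Int.fdiv_eq_ediv]; omega
    refine ⟨L, hL, ?_, h, by rw [hfd]; exact hh, by rw [hmh]⟩
    rw [PySem.Int.mod, Int.fmod_eq_emod]; omega
  · rintro ⟨L, hL, hm0, h, hh, rfl⟩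
    have h1 : 1 ≤ L := hr L hL
    have hev : L.toNat % 2 = 0 := by rw [PySem.Int.mod, Int.fmod_eq_emod] at hm0; omega
    have hfd : (PySem.Int.floordiv L 2).toNat = L.toNat / 2 := by
      rw [PySem.Int.floordiv, Int.fdiv_eq_ediv]; omega
    rw [hfd] at hh
    obtain ⟨hmem, hrc⟩ := isrc_mirror (L.toNat / 2) h hh
    have hk : 2 * (L.toNat / 2) = L.toNat := by omega
    rw [hk] at hmem
    exact ⟨L, hL, pvMirror h, hmem, hrc, rfl⟩

theorem non_iff_diff (r : List Int) (hr : ∀ L ∈ r, 1 ≤ L) (x : String) :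
    x ∈ pvNonRaw r ↔ x ∈ pvAllRaw r ∧ x ∉ pvPalRaw r := by
  rw [mem_pvNonRaw, mem_pvAllRaw, mem_pvPalRaw]
  constructor
  · rintro ⟨L, hL, m, hm, hrc, rfl⟩
    refine ⟨⟨L, hL, m, hm, rfl⟩, ?_⟩
    rintro ⟨L', hL', hm0, h, hh, hx⟩
    have h1 : 1 ≤ L' := hr L' hL'
    have hfd : (PySem.Int.floordiv L' 2).toNat = L'.toNat / 2 := by
      rw [PySem.Int.floordiv, Int.fdiv_eq_ediv]; omega
    rw [hfd] at hh
    obtain ⟨_, hrc'⟩ := isrc_mirror (L'.toNat / 2) h hh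
    have hme : m = pvMirror h := (ofList_inj _ _).1 hx
    rw [← hme] at hrc'
    rw [hrc] at hrc'
    exact Bool.false_ne_true hrc'
  · rintro ⟨⟨L, hL, m, hm, rfl⟩, hnp⟩
    have h1 : 1 ≤ L := hr L hL
    refine ⟨L, hL, m, hm, ?_, rfl⟩
    by_contra hne
    have htrue : is_self_reverse_complement (String.ofList m) = true :=
      Bool.not_eq_false _ ▸ (by simpa using hne)
    obtain ⟨hev, h, hh, hmh⟩ := (isrc_iff_mirror L.toNat m hm).1 htrue
    apply hnp
    have hfd : (PySem.Int.floordiv L 2).toNat = L.toNat / 2 := by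
      rw [PySem.Int.floordiv, Int.fdiv_eq_ediv]; omega
    refine ⟨L, hL, ?_, h, by rw [hfd]; exact hh, by rw [hmh]⟩
    rw [PySem.Int.mod, Int.fmod_eq_emod]; omega

-- ===== VERDICT (by name: the statement is the Claim_ definition above) =====
theorem generate_motifs_by_complementarity_spec : Claim_equal_generate_motifs_by_complementarity := by
  intro n _
  unfold Spec_generate_motifs_by_complementarity
  unfold generate_motifs_by_complementarity generate_motifs_by_complementarity_alt
  have hr : ∀ L ∈ PySem.List.pyRange 1 (n + 1) 1, 1 ≤ L :=
    fun L hL => (PySem.List.mem_pyRange_one.1 hL).1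
  simp only [foldA_eq, foldB_eq, PySem.Set.update_empty, List.nil_append]
  refine congrArg₂ Prod.mk ?_ ?_
  · exact PySem.List.sorted_eq_sorted_of_perm _ _ _ (fun _ _ h => h)
      ((List.perm_ext_iff_of_nodup (PySem.Set.nodup_ofList _) (PySem.Set.nodup_ofList _)).2
        (fun x => by
          rw [PySem.Set.mem_ofList, PySem.Set.mem_ofList]
          exact self_iff_pal _ hr x))
  · refine PySem.List.sorted_eq_sorted_of_perm _ _ _ (fun _ _ h => h)
      ((List.perm_ext_iff_of_nodup (PySem.Set.nodup_ofList _)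
        (PySem.Set.nodup_diff _ _ (PySem.Set.nodup_ofList _))).2
        (fun x => by
          rw [PySem.Set.mem_ofList, PySem.Set.mem_diff, PySem.Set.mem_ofList,
            PySem.Set.mem_ofList]
          exact non_iff_diff _ hr x))
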